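-- pv_equiv track=rewrite | github.com/ethan2012/hl7compress | hl7compress/src/decompress.py | decompress_hl7
-- ===== SOURCE A (Python) =====
-- def decompress_hl7(compressed, template):
--     """
--     Decompress HL7 messages based on templates
--     :param compressed: Compressed HL7 message string
--     :param template: HL7 template string
--     :return: Original HL7 message string
--     """
--     comp_lines = compressed.splitlines()
--     tpl_lines = template.splitlines()
--     decompressed_lines = []
--
--     # Ensure that the number of template lines is not less than the number of compressed lines
--     tpl_lines = tpl_lines + [''] * (len(comp_lines) - len(tpl_lines))
--
--     for comp_line, tpl_line in zip(comp_lines, tpl_lines):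
--         if not tpl_line.strip():  # No corresponding template lines, reserved directly
--             decompressed_lines.append(comp_line)
--             continue
--
--         comp_fields = comp_line.split('|')
--         tpl_fields = tpl_line.split('|')
--
--         # segment must match
--         if comp_fields[0] != tpl_fields[0]:
--             decompressed_lines.append(comp_line)
--             continue
--
--         decompressed_fields = [comp_fields[0]]  # keep segment
--         tpl_idx, comp_idx = 1, 1
--
--         # rebuild
--         while tpl_idx < len(tpl_fields) or comp_idx < len(comp_fields):
--             if tpl_idx < len(tpl_fields):
--                 if comp_idx < len(comp_fields) and comp_fields[comp_idx] != '':
--                     # use compressed value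
--                     decompressed_fields.append(comp_fields[comp_idx])
--                     comp_idx += 1
--                     tpl_idx += 1
--                 else:
--                     # use template value
--                     decompressed_fields.append(tpl_fields[tpl_idx])
--                     if comp_idx < len(comp_fields):
--                         comp_idx += 1  # skip empty field
--                     tpl_idx += 1
--             else:
--                 # Handle redundant compression fields
--                 decompressed_fields.append(comp_fields[comp_idx])
--                 comp_idx += 1
--
--         decompressed_lines.append('|'.join(decompressed_fields))
--
--     return '\r'.join(decompressed_lines)
-- ===== SOURCE B (Python) =====
-- def decompress_hl7(compressed, template):
--     """
--     Decompress HL7 messages based on templates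
--     :param compressed: Compressed HL7 message string
--     :param template: HL7 template string
--     :return: Original HL7 message string
--     """
--     comp_lines = compressed.splitlines()
--     tpl_lines = template.splitlines()
--     tpl_lines = tpl_lines + [''] * (len(comp_lines) - len(tpl_lines))
--
--     out = []
--     for comp_line, tpl_line in zip(comp_lines, tpl_lines):
--         if not tpl_line.strip():
--             out.append(comp_line)
--             continue
--         comp_fields = comp_line.split('|')
--         fields = tpl_line.split('|')  # start from the template's fields
--         if comp_fields[0] != fields[0]:
--             out.append(comp_line)
--             continue
--         # overlay: patch the template field array in place with the
--         # non-empty compressed fields, appending any extra ones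
--         for i, c in enumerate(comp_fields):
--             if i < len(fields):
--                 if c != '':
--                     fields[i] = c
--             else:
--                 fields.append(c)
--         out.append('|'.join(fields))
--
--     return '\r'.join(out)
-- ===== Notes on version B (the rewrite author's own statement) =====
-- stated objective: alternative
-- what changed: A merges the template and compressed field streams with a two-pointer while loop (tpl_idx/comp_idx state machine); B instead starts from the template's field list and overlays it in place, overwriting position i with the i-th compressed field when that field is non-empty and appending compressed fields past the template's length.
import Mathlib
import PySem

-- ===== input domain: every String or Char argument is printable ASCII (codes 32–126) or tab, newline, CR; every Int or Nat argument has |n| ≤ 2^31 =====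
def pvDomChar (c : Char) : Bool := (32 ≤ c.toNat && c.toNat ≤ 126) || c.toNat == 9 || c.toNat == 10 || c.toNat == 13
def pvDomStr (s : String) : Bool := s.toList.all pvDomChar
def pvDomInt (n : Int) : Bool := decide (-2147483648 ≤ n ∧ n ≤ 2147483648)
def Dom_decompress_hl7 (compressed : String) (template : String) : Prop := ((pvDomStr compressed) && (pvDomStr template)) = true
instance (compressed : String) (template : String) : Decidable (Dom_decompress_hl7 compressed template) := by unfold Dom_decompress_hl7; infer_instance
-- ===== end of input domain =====

-- B replaces A's two-pointer merge of the template/compressed field streams by an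
-- in-place overlay onto a copy of the template's field list; same return value on all inputs.

-- ===== PORT A =====
-- A's `while tpl_idx < len(tpl_fields) or comp_idx < len(comp_fields)` loop,
-- emitting one field per iteration (fields are List Char; Python '' is []);
-- reads tf[ti]/cf[ci] are always in range, so getD is exact
-- reads tf[ti]/cf[ci] are always in range, so getD is exact; the loop runs at
-- most len(tpl_fields)+len(comp_fields) times, which the fuel argument bounds
def pvLoopA (tf cf : List (List Char)) (ti ci : Nat) : Nat → List (List Char)
  | 0 => []
  | fuel + 1 =>
    if _h : ti < tf.length ∨ ci < cf.length then
      if _h1 : ti < tf.length then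
        if _h2 : ci < cf.length ∧ cf.getD ci [] ≠ [] then
          -- use compressed value
          cf.getD ci [] :: pvLoopA tf cf (ti + 1) (ci + 1) fuel
        else
          -- use template value (skip an empty compressed field if there is one)
          tf.getD ti [] :: pvLoopA tf cf (ti + 1) (if ci < cf.length then ci + 1 else ci) fuel
      else
        -- redundant compressed fields
        cf.getD ci [] :: pvLoopA tf cf ti (ci + 1) fuel
    else []

-- one iteration of A's `for comp_line, tpl_line in zip(...)` body
-- (split('|')/'|'.join on the exact PySem.Chars primitives)
def pvLineA (comp_line tpl_line : String) : String :=
  if PySem.Str.strip tpl_line = "" then comp_line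
  else
    let cf := PySem.Chars.splitOn comp_line.toList ['|']
    let tf := PySem.Chars.splitOn tpl_line.toList ['|']
    if cf.getD 0 [] ≠ tf.getD 0 [] then comp_line
    else String.ofList (PySem.Chars.join ['|'] (cf.getD 0 [] :: pvLoopA tf cf 1 1 (tf.length + cf.length)))

def decompress_hl7 (compressed : String) (template : String) : String :=
  let comp_lines := PySem.Str.splitlines compressed
  let tpl_lines0 := PySem.Str.splitlines template
  let tpl_lines := tpl_lines0 ++ List.replicate (comp_lines.length - tpl_lines0.length) ""
  PySem.Str.join "\r" ((comp_lines.zip tpl_lines).map (fun p => pvLineA p.1 p.2))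

-- ===== PORT B =====
-- B's `for i, c in enumerate(comp_fields)` overlay loop: state is the patched
-- field list `fs` (a copy of the template's fields), plus the running index i
def pvOverlay (comp : List (List Char)) (i : Nat) (fs : List (List Char)) : List (List Char) :=
  match comp with
  | [] => fs
  | c :: cs =>
    if i < fs.length then
      pvOverlay cs (i + 1) (if c ≠ [] then fs.set i c else fs)
    else
      pvOverlay cs (i + 1) (fs ++ [c])

-- one iteration of B's loop body
def pvLineB (comp_line tpl_line : String) : String :=
  if PySem.Str.strip tpl_line = "" then comp_line
  else
    let cf := PySem.Chars.splitOn comp_line.toList ['|']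
    let tf := PySem.Chars.splitOn tpl_line.toList ['|']
    if cf.getD 0 [] ≠ tf.getD 0 [] then comp_line
    else String.ofList (PySem.Chars.join ['|'] (pvOverlay cf 0 tf))

def decompress_hl7_alt (compressed : String) (template : String) : String :=
  let comp_lines := PySem.Str.splitlines compressed
  let tpl_lines0 := PySem.Str.splitlines template
  let tpl_lines := tpl_lines0 ++ List.replicate (comp_lines.length - tpl_lines0.length) ""
  PySem.Str.join "\r" ((comp_lines.zip tpl_lines).map (fun p => pvLineB p.1 p.2))

-- ===== PRECONDITION & SPEC =====
def Spec_decompress_hl7 (compressed : String) (template : String) (out : String) : Prop := out = decompress_hl7_alt compressed template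
instance (compressed : String) (template : String) (out : String) : Decidable (Spec_decompress_hl7 compressed template out) := by unfold Spec_decompress_hl7; infer_instance

-- ===== CLAIM (what is proved, stated in full; the proofs are below) =====
def Claim_equal_decompress_hl7 : Prop := ∀ (compressed : String) (template : String), Dom_decompress_hl7 compressed template → Spec_decompress_hl7 compressed template (decompress_hl7 compressed template)

-- ===== LEMMAS AND PROOFS =====

-- the functional merge both programs compute: next field is the compressed one
-- if present and non-empty, else the template one; leftovers of either side kept
def pvMerge : List (List Char) → List (List Char) → List (List Char)
  | [], cs => cs
  | t :: ts, [] => t :: pvMerge ts []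
  | t :: ts, c :: cs => (if c ≠ [] then c else t) :: pvMerge ts cs

theorem pvMerge_nil_right : ∀ (l : List (List Char)), pvMerge l [] = l := by
  intro l
  induction l with
  | nil => rfl
  | cons t ts ih => rw [pvMerge, ih]

theorem pvTakeSucc (l : List (List Char)) (i : Nat) (h : i < l.length) :
    l.take (i+1) = l.take i ++ [l[i]] := by
  rw [List.take_add_one, List.getElem?_eq_getElem h]; rfl

theorem pvSetDecomp (l : List (List Char)) (i : Nat) (c : List Char) (h : i < l.length) :
    l.set i c = l.take i ++ c :: l.drop (i+1) := by
  rw [List.set_eq_take_append_cons_drop, if_pos h]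

theorem pvOverlay_eq_merge :
    ∀ (cs : List (List Char)) (i : Nat) (fs : List (List Char)), i ≤ fs.length →
      pvOverlay cs i fs = fs.take i ++ pvMerge (fs.drop i) cs := by
  intro cs
  induction cs with
  | nil =>
    intro i fs _
    rw [pvOverlay, pvMerge_nil_right, List.take_append_drop]
  | cons c cs ih =>
    intro i fs hle
    rw [pvOverlay]
    by_cases h : i < fs.length
    · rw [if_pos h]
      have hd : fs.drop i = fs[i] :: fs.drop (i + 1) := (List.getElem_cons_drop h).symm
      by_cases hc : c = []
      · simp only [hc, ne_eq, not_true_eq_false, if_false]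
        rw [ih (i+1) fs (by omega), hd, pvMerge, pvTakeSucc fs i h,
          if_neg (fun hh => hh rfl)]
        simp only [List.append_assoc, List.cons_append, List.nil_append]
      · simp only [ne_eq, hc, not_false_eq_true, if_true]
        have hlen : (fs.take i).length = i := by simp; omega
        have htake : (fs.set i c).take (i+1) = fs.take i ++ [c] := by
          rw [pvSetDecomp fs i c h, List.take_append, hlen,
            List.take_of_length_le (by omega)]
          have h1 : i + 1 - i = 1 := by omega
          rw [h1, List.take_succ_cons, List.take_zero]
        have hdrop : (fs.set i c).drop (i+1) = fs.drop (i+1) := by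
          rw [pvSetDecomp fs i c h, List.drop_append, hlen,
            List.drop_of_length_le (by omega)]
          have h1 : i + 1 - i = 1 := by omega
          rw [h1, List.drop_succ_cons, List.drop_zero, List.nil_append]
        rw [ih (i+1) (fs.set i c) (by simp; omega), htake, hdrop, hd, pvMerge]
        simp [hc]
    · have hi : i = fs.length := by omega
      rw [if_neg h, ih (i+1) (fs ++ [c]) (by simp; omega)]
      subst hi
      rw [List.take_of_length_le (by simp), List.drop_of_length_le (by simp)]
      simp [pvMerge]
-- note: pvMerge (drop len) (c::cs) = pvMerge [] (c::cs) = c::cs handled by simp above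

theorem pvLoopA_eq_merge (tf cf : List (List Char)) :
    ∀ k ti ci, tf.length - ti + (cf.length - ci) ≤ k → ti ≤ tf.length → ci ≤ cf.length →
      pvLoopA tf cf ti ci k = pvMerge (tf.drop ti) (cf.drop ci) := by
  intro k
  induction k with
  | zero =>
    intro ti ci hk hti hci
    have h1 : ti = tf.length := by omega
    have h2 : ci = cf.length := by omega
    subst h1 h2
    rw [pvLoopA]
    simp [pvMerge]
  | succ k ih =>
    intro ti ci hk hti hci
    rw [pvLoopA]
    by_cases h1 : ti < tf.length
    · have hdT : tf.drop ti = tf[ti] :: tf.drop (ti + 1) := (List.getElem_cons_drop h1).symm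
      by_cases hc : ci < cf.length
      · have hdC : cf.drop ci = cf[ci] :: cf.drop (ci + 1) := (List.getElem_cons_drop hc).symm
        rw [hdT, hdC, pvMerge]
        by_cases he : cf.getD ci [] ≠ []
        · rw [dif_pos (Or.inl h1), dif_pos h1, dif_pos ⟨hc, he⟩,
            ih (ti+1) (ci+1) (by omega) (by omega) (by omega)]
          rw [List.getD_eq_getElem cf [] hc] at he ⊢
          rw [if_pos he]
        · rw [dif_pos (Or.inl h1), dif_pos h1, dif_neg (fun hh => he hh.2), if_pos hc,
            ih (ti+1) (ci+1) (by omega) (by omega) (by omega)]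
          rw [List.getD_eq_getElem cf [] hc] at he
          rw [if_neg he, List.getD_eq_getElem tf [] h1]
      · have hce : ci = cf.length := by omega
        rw [hdT]
        subst hce
        rw [List.drop_length, pvMerge, dif_pos (Or.inl h1), dif_pos h1,
          dif_neg (fun hh => absurd hh.1 (lt_irrefl _)), if_neg (lt_irrefl _),
          ih (ti+1) cf.length (by omega) (by omega) (le_refl _),
          List.drop_length, List.getD_eq_getElem tf [] h1]
    · have hte : ti = tf.length := le_antisymm hti (not_lt.mp h1)
      subst hte
      by_cases hc : ci < cf.length
      · have hdC : cf.drop ci = cf[ci] :: cf.drop (ci + 1) := (List.getElem_cons_drop hc).symm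
        rw [List.drop_length, dif_pos (Or.inr hc), dif_neg (lt_irrefl _),
          ih tf.length (ci+1) (by omega) (le_refl _) (by omega),
          List.drop_length, hdC, pvMerge, pvMerge, List.getD_eq_getElem cf [] hc]
      · have hce : ci = cf.length := le_antisymm hci (not_lt.mp hc)
        subst hce
        rw [dif_neg (by simp), List.drop_length, List.drop_length, pvMerge]

theorem pvSplitOn_go_ne_nil (sep : List Char) :
    ∀ fuel l cur acc, PySem.Chars.splitOn.go sep fuel l cur acc ≠ [] := by
  intro fuel
  induction fuel with
  | zero => intro l cur acc; simp [PySem.Chars.splitOn.go]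
  | succ n ih =>
    intro l cur acc
    cases l with
    | nil => simp [PySem.Chars.splitOn.go]
    | cons c rest =>
      rw [PySem.Chars.splitOn.go]
      split
      · exact ih _ _ _
      · exact ih _ _ _

theorem pvSplitOn_ne_nil (s sep : List Char) : PySem.Chars.splitOn s sep ≠ [] := by
  rw [PySem.Chars.splitOn]
  exact pvSplitOn_go_ne_nil sep _ _ _ _

theorem pvLine_eq (c t : String) : pvLineA c t = pvLineB c t := by
  rw [pvLineA, pvLineB]
  by_cases h0 : PySem.Str.strip t = ""
  · rw [if_pos h0, if_pos h0]
  · rw [if_neg h0, if_neg h0]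
    set cf := PySem.Chars.splitOn c.toList ['|'] with hcf
    set tf := PySem.Chars.splitOn t.toList ['|'] with htf
    by_cases hh : cf.getD 0 [] ≠ tf.getD 0 []
    · rw [if_pos hh, if_pos hh]
    · rw [if_neg hh, if_neg hh]
      have hT : 1 ≤ tf.length := List.length_pos_of_ne_nil (pvSplitOn_ne_nil _ _)
      have hC : 1 ≤ cf.length := List.length_pos_of_ne_nil (pvSplitOn_ne_nil _ _)
      rw [pvOverlay_eq_merge cf 0 tf (by omega), List.take_zero, List.drop_zero,
        List.nil_append]
      -- peel the head field off pvMerge: it equals cf[0] since the segments match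
      obtain ⟨t0, ts, hts⟩ := List.exists_cons_of_ne_nil (pvSplitOn_ne_nil t.toList ['|'])
      obtain ⟨c0, cs, hcs⟩ := List.exists_cons_of_ne_nil (pvSplitOn_ne_nil c.toList ['|'])
      rw [← htf] at hts; rw [← hcf] at hcs
      have hhead : c0 = t0 := by
        have := not_not.mp hh
        simpa [hcs, hts] using this
      have hloop := pvLoopA_eq_merge tf cf (tf.length + cf.length) 1 1 (by omega)
        (by omega) (by omega)
      rw [hts, hcs, pvMerge, hcs, hts] at *
      simp only [List.getD_cons_zero, List.drop_succ_cons] at *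
      rw [hloop, List.drop_zero, List.drop_zero]
      by_cases hc0 : c0 = [] <;> simp [hc0, ← hhead]

-- ===== VERDICT (by name: the statement is the Claim_ definition above) =====
theorem decompress_hl7_spec : Claim_equal_decompress_hl7 := by
  intro compressed template _
  unfold Spec_decompress_hl7 decompress_hl7 decompress_hl7_alt
  simp only [pvLine_eq]
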